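-- pv_equiv track=rewrite | github.com/wdfoxy34/Diferentes-metodos-para-grafos | ListaAdj.py | grau_vertices
-- ===== SOURCE A (Python) =====
-- def grau_vertices(grafo):
--     """
--     Calcula e retorna o grau (out, in, total) de cada vértice.
--     Passos:
--     1. Inicializar um dict de graus vazia
--     2. Para cada vertice, colocar no dict uma estrutura com in, out e total zerado
--     3. Para cada u em grafo:
--          - out_degree[u] = tamanho de vizinhos
--          - para cada v em grafo:
--             - verificar se u está na lista de vizinho de v,
--             - caso esteja, adicionar +1 para o grau de entrada de u
--     4. Calcular o grau total somando entrada + saida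
--     5. Retornar uma estrutura contendo out,in,total por vértice (ex: dict de tuplas).
--     """
--     graus = {}
--
--     for vertice in grafo:
--         graus[vertice] = {"din":0, "dout":0, "total":0}
--
--     for u in grafo:
--         graus[u]["dout"] = len(grafo[u])
--
--         for v in grafo:
--             if u in grafo[v]:
--                 graus[u]["din"] += 1
--
--     for vertice in grafo:
--         graus[vertice]["total"] = graus[vertice]["din"] + graus[vertice]["dout"]
--
--     return graus
-- ===== SOURCE B (Python) =====
-- def grau_vertices(grafo):
--     din = {}
--     for vizinhos in grafo.values():
--         for u in set(vizinhos):
--             din[u] = din.get(u, 0) + 1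
--     return {u: {"din": din.get(u, 0), "dout": len(vs), "total": din.get(u, 0) + len(vs)}
--             for u, vs in grafo.items()}
-- ===== Notes on version B (the rewrite author's own statement) =====
-- stated objective: faster
-- what changed: A scans every adjacency list once per vertex to compute each in-degree (nested loops over all vertex pairs); B makes a single pass over the adjacency lists, incrementing a counter for each distinct neighbour, then builds the result in one map.
import Mathlib
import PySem

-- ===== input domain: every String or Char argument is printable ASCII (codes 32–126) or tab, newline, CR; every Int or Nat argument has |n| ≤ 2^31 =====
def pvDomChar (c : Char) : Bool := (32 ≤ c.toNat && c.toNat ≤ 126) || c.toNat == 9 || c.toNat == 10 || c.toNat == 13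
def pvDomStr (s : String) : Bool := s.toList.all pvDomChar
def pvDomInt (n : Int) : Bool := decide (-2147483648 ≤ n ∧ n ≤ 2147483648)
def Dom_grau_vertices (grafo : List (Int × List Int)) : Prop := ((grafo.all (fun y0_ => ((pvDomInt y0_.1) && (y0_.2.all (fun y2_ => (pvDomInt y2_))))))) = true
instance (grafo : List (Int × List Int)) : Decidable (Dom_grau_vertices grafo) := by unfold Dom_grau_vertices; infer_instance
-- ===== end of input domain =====

-- B replaces A's quadratic "for every vertex u, scan every adjacency list for u" with one pass
-- over the adjacency lists, counting each (deduplicated) neighbour once: O(V+E) instead of O(V·E·L).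

-- ===== PORT A =====
-- the Python dict literal {"din": 0, "dout": 0, "total": 0}
def pvZeroRec : PySem.Dict String Int :=
  PySem.Dict.ofList [("din", 0), ("dout", 0), ("total", 0)]

def grau_vertices (grafo : List (Int × List Int)) : List (Int × List (String × Int)) :=
  let g := PySem.Dict.ofList grafo           -- the Python dict `grafo`
  -- for vertice in grafo: graus[vertice] = {"din":0, "dout":0, "total":0}
  let graus : PySem.Dict Int (PySem.Dict String Int) :=
    g.keys.foldl (fun d vertice => d.insert vertice pvZeroRec) PySem.Dict.empty
  -- for u in grafo: graus[u]["dout"] = len(grafo[u]); for v in grafo: if u in grafo[v]: graus[u]["din"] += 1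
  -- (grafo[u] / grafo[v] always succeed since u, v are keys, so getD is exact; graus[u] exists, so modify is exact)
  let graus := g.keys.foldl (fun d u =>
    let d := d.modify u PySem.Dict.empty
      (fun r => r.insert "dout" ((g.getD u []).length : Int))
    g.keys.foldl (fun d v =>
      if (g.getD v []).contains u then
        d.modify u PySem.Dict.empty (fun r => r.modify "din" 0 (· + 1))
      else d) d) graus
  -- for vertice in grafo: graus[vertice]["total"] = graus[vertice]["din"] + graus[vertice]["dout"]
  let graus := g.keys.foldl (fun d vertice =>
    d.modify vertice PySem.Dict.empty
      (fun r => r.insert "total" (r.getD "din" 0 + r.getD "dout" 0))) graus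
  graus.items.map (fun p => (p.1, p.2.items))

-- ===== PORT B =====
-- (Python iterates `set(vizinhos)` in hash order; only commutative counter increments depend on it,
-- so the resulting dict is order-independent and PySem.Set's first-occurrence order is exact here)
def grau_vertices_alt (grafo : List (Int × List Int)) : List (Int × List (String × Int)) :=
  let g := PySem.Dict.ofList grafo           -- the Python dict `grafo`
  -- din = {}; for vizinhos in grafo.values(): for u in set(vizinhos): din[u] = din.get(u, 0) + 1
  let din : PySem.Dict Int Int :=
    g.values.foldl (fun d vizinhos =>
      (PySem.Set.ofList vizinhos).foldl (fun d u => d.insert u (d.getD u 0 + 1)) d)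
      PySem.Dict.empty
  -- {u: {"din": din.get(u,0), "dout": len(vs), "total": din.get(u,0) + len(vs)} for u, vs in grafo.items()}
  g.items.map (fun p =>
    (p.1, [("din", din.getD p.1 0), ("dout", (p.2.length : Int)),
           ("total", din.getD p.1 0 + (p.2.length : Int))]))

-- ===== PRECONDITION & SPEC =====
def Spec_grau_vertices (grafo : List (Int × List Int)) (out : List (Int × List (String × Int))) : Prop := out = grau_vertices_alt grafo
instance (grafo : List (Int × List Int)) (out : List (Int × List (String × Int))) : Decidable (Spec_grau_vertices grafo out) := by unfold Spec_grau_vertices; infer_instance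

-- ===== CLAIM (what is proved, stated in full; the proofs are below) =====
def Claim_equal_grau_vertices : Prop := ∀ (grafo : List (Int × List Int)), Dom_grau_vertices grafo → Spec_grau_vertices grafo (grau_vertices grafo)

-- ===== LEMMAS AND PROOFS =====

theorem pv_zero_eq : pvZeroRec = PySem.Dict.mk [("din", 0), ("dout", 0), ("total", 0)] := rfl

-- two modifies at the same key compose
theorem pv_modify_modify {κ ν : Type} [BEq κ] [LawfulBEq κ] (d : PySem.Dict κ ν)
    (k : κ) (d0 : ν) (f g : ν → ν) :
    (d.modify k d0 f).modify k d0 g = d.modify k d0 (fun x => g (f x)) := by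
  simp [PySem.Dict.modify, PySem.Dict.getD_insert_self, PySem.Dict.insert_insert_self]

-- A's inner loop: a fold of conditional modifies at the fixed key u collapses to one modify
theorem pv_innerfold (c : Int → Bool) (F : PySem.Dict String Int → PySem.Dict String Int)
    (u : Int) (ks : List Int) :
    ∀ (d : PySem.Dict Int (PySem.Dict String Int)) (G : PySem.Dict String Int → PySem.Dict String Int),
    ks.foldl (fun d v => if c v then d.modify u PySem.Dict.empty F else d)
        (d.modify u PySem.Dict.empty G)
      = d.modify u PySem.Dict.empty (F^[ks.countP c] ∘ G) := by
  induction ks with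
  | nil => intro d G; simp
  | cons v ks ih =>
      intro d G
      simp only [List.foldl_cons, List.countP_cons]
      by_cases hc : c v
      · rw [if_pos hc, pv_modify_modify, ih d (fun x => F (G x))]
        simp [hc]
        rfl
      · rw [if_neg hc, ih d G]
        simp [hc]

theorem pv_iter_addDin (n : ℕ) (a b c : Int) :
    (fun r => PySem.Dict.modify r "din" 0 (· + 1))^[n]
        (PySem.Dict.mk [("din", a), ("dout", b), ("total", c)])
      = PySem.Dict.mk [("din", a + n), ("dout", b), ("total", c)] := by
  induction n generalizing a with
  | zero => simp
  | succ n ih =>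
      rw [Function.iterate_succ_apply]
      have h1 : PySem.Dict.modify (PySem.Dict.mk [("din", a), ("dout", b), ("total", c)]) "din" 0 (· + 1)
          = PySem.Dict.mk [("din", a + 1), ("dout", b), ("total", c)] := by
        simp [PySem.Dict.modify, PySem.Dict.insert, PySem.Dict.getD, PySem.Dict.get?, PySem.Dict.contains]
      rw [h1, ih]
      simp only [PySem.Dict.mk.injEq, List.cons.injEq, Prod.mk.injEq, and_true, true_and]
      push_cast
      ring

theorem pv_foldl_modify_getD_of_not_mem
    (Φ : Int → PySem.Dict String Int → PySem.Dict String Int) (l : List Int)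
    (d : PySem.Dict Int (PySem.Dict String Int)) (w : Int) (hw : w ∉ l) :
    (l.foldl (fun d u => d.modify u PySem.Dict.empty (Φ u)) d).getD w PySem.Dict.empty
      = d.getD w PySem.Dict.empty := by
  induction l generalizing d with
  | nil => rfl
  | cons u l ih =>
      simp only [List.foldl_cons]
      rw [ih _ (by intro h; exact hw (List.mem_cons_of_mem _ h))]
      exact PySem.Dict.getD_modify_of_ne d _ _ (by rintro rfl; exact hw (List.mem_cons_self))

theorem pv_foldl_modify_getD_of_mem
    (Φ : Int → PySem.Dict String Int → PySem.Dict String Int) (l : List Int)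
    (d : PySem.Dict Int (PySem.Dict String Int)) (w : Int) (hl : l.Nodup) (hw : w ∈ l) :
    (l.foldl (fun d u => d.modify u PySem.Dict.empty (Φ u)) d).getD w PySem.Dict.empty
      = Φ w (d.getD w PySem.Dict.empty) := by
  induction l generalizing d with
  | nil => cases hw
  | cons u l ih =>
      simp only [List.foldl_cons]
      rcases List.mem_cons.mp hw with rfl | hw'
      · rw [pv_foldl_modify_getD_of_not_mem _ _ _ _ (List.nodup_cons.mp hl).1]
        exact PySem.Dict.getD_modify_self d w PySem.Dict.empty (Φ w)
      · have hne : w ≠ u := by rintro rfl; exact (List.nodup_cons.mp hl).1 hw'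
        rw [ih _ (List.nodup_cons.mp hl).2 hw', PySem.Dict.getD_modify_of_ne d _ _ hne]

theorem pv_set_update_self {α : Type} [BEq α] [LawfulBEq α] (xs : List α) :
    ∀ (s : PySem.Set α), (∀ x ∈ xs, x ∈ s) → PySem.Set.update s xs = s := by
  induction xs with
  | nil => intro s _; rfl
  | cons x xs ih =>
      intro s h
      have hadd : PySem.Set.add s x = s := by
        simp [PySem.Set.add, PySem.Set.contains, h x (by simp)]
      calc PySem.Set.update s (x :: xs) = PySem.Set.update (PySem.Set.add s x) xs := rfl
        _ = PySem.Set.update s xs := by rw [hadd]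
        _ = s := ih s (fun y hy => h y (List.mem_cons_of_mem _ hy))

-- B's counting loop: the in-degree dict counts, per adjacency list, whether u occurs in it
theorem pv_dinfold (vss : List (List Int)) :
    ∀ (d : PySem.Dict Int Int) (u : Int),
    (vss.foldl (fun d vs => (PySem.Set.ofList vs).foldl (fun d u => d.insert u (d.getD u 0 + 1)) d) d).getD u 0
      = d.getD u 0 + (vss.countP (fun vs => vs.contains u) : Int) := by
  induction vss with
  | nil => intro d u; simp
  | cons vs vss ih =>
      intro d u
      simp only [List.foldl_cons]
      rw [ih]
      have hcnt : List.count u (PySem.Set.ofList vs) = if vs.contains u then 1 else 0 := by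
        by_cases hm : u ∈ vs
        · rw [if_pos (by simpa using hm)]
          exact List.count_eq_one_of_mem (PySem.Set.nodup_ofList vs) ((PySem.Set.mem_ofList vs u).mpr hm)
        · rw [if_neg (by simpa using hm)]
          exact List.count_eq_zero_of_not_mem (fun h => hm ((PySem.Set.mem_ofList vs u).mp h))
      rw [PySem.Dict.getD_foldl_insert_add_one, hcnt]
      push_cast [List.countP_cons]
      split_ifs <;> ring

theorem grau_vertices_eq (grafo : List (Int × List Int)) :
    grau_vertices grafo = grau_vertices_alt grafo := by
  unfold grau_vertices grau_vertices_alt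
  simp only []
  set g := PySem.Dict.ofList grafo with hg
  have hnd : g.keys.Nodup := PySem.Dict.nodup_keys_ofList grafo
  -- the common per-vertex data
  set N : Int → ℕ := fun u => g.keys.countP (fun v => (g.getD v []).contains u) with hN
  set L : Int → Int := fun u => ((g.getD u []).length : Int) with hL
  -- ===== A's side =====
  set P1 : PySem.Dict Int (PySem.Dict String Int) :=
    g.keys.foldl (fun d vertice => d.insert vertice pvZeroRec) PySem.Dict.empty with hP1
  have hP1items : P1.items = g.keys.map (fun v => (v, pvZeroRec)) := by
    have := PySem.Dict.items_foldl_insert_fresh g.keys (fun a => a) (fun _ => pvZeroRec)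
      PySem.Dict.empty (fun a _ => PySem.Dict.contains_empty a) (by simpa using hnd)
    simpa using this
  have hP1keys : P1.keys = g.keys := by
    simp only [PySem.Dict.keys, hP1items, List.map_map]
    simp
  have hP1getD : ∀ u ∈ g.keys, P1.getD u PySem.Dict.empty = pvZeroRec := by
    intro u hu
    exact PySem.Dict.getD_of_mem_items P1
      (by rw [hP1items]; exact List.mem_map_of_mem hu) (by rw [hP1keys]; exact hnd) _
  set Φ2 : Int → PySem.Dict String Int → PySem.Dict String Int :=
    fun u => (fun r => PySem.Dict.modify r "din" 0 (· + 1))^[N u] ∘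
      (fun r => r.insert "dout" (L u)) with hΦ2
  have hbody : (fun (d : PySem.Dict Int (PySem.Dict String Int)) (u : Int) =>
      let d := d.modify u PySem.Dict.empty (fun r => r.insert "dout" ((g.getD u []).length : Int))
      g.keys.foldl (fun d v =>
        if (g.getD v []).contains u then
          d.modify u PySem.Dict.empty (fun r => r.modify "din" 0 (· + 1))
        else d) d)
      = (fun d u => d.modify u PySem.Dict.empty (Φ2 u)) := by
    funext d u
    exact pv_innerfold (fun v => (g.getD v []).contains u) _ u g.keys d _
  rw [hbody]
  set P2 : PySem.Dict Int (PySem.Dict String Int) :=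
    g.keys.foldl (fun d u => d.modify u PySem.Dict.empty (Φ2 u)) P1 with hP2
  have hP2keys : P2.keys = g.keys := by
    have h := PySem.Dict.keys_foldl_modify g.keys PySem.Dict.empty (fun _ x => Φ2 x) P1
    rw [hP2, h, hP1keys, pv_set_update_self g.keys g.keys (fun x hx => hx)]
  have hP2getD : ∀ u ∈ g.keys, P2.getD u PySem.Dict.empty
      = PySem.Dict.mk [("din", (N u : Int)), ("dout", L u), ("total", 0)] := by
    intro u hu
    rw [hP2, pv_foldl_modify_getD_of_mem Φ2 g.keys P1 u hnd hu, hP1getD u hu]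
    have hz : pvZeroRec.insert "dout" (L u)
        = PySem.Dict.mk [("din", 0), ("dout", L u), ("total", 0)] := by
      rw [pv_zero_eq]
      simp [PySem.Dict.insert, PySem.Dict.contains]
    simp only [hΦ2, Function.comp_apply, hz, pv_iter_addDin]
    norm_num
  set Φ3 : PySem.Dict String Int → PySem.Dict String Int :=
    fun r => r.insert "total" (r.getD "din" 0 + r.getD "dout" 0) with hΦ3
  set P3 : PySem.Dict Int (PySem.Dict String Int) :=
    g.keys.foldl (fun d vertice => d.modify vertice PySem.Dict.empty Φ3) P2 with hP3
  have hP3keys : P3.keys = g.keys := by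
    have h := PySem.Dict.keys_foldl_modify g.keys PySem.Dict.empty (fun _ _ => Φ3) P2
    rw [hP3, h, hP2keys, pv_set_update_self g.keys g.keys (fun x hx => hx)]
  have hP3getD : ∀ u ∈ g.keys, P3.getD u PySem.Dict.empty
      = PySem.Dict.mk [("din", (N u : Int)), ("dout", L u), ("total", (N u : Int) + L u)] := by
    intro u hu
    rw [hP3, pv_foldl_modify_getD_of_mem (fun _ => Φ3) g.keys P2 u hnd hu, hP2getD u hu]
    simp [hΦ3, PySem.Dict.insert, PySem.Dict.contains, PySem.Dict.getD, PySem.Dict.get?]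
  have hAitems : P3.items = g.keys.map (fun k => (k, P3.getD k PySem.Dict.empty)) := by
    have h := PySem.Dict.items_eq_map_keys P3 (by rw [hP3keys]; exact hnd) PySem.Dict.empty
    rwa [hP3keys] at h
  -- ===== B's side =====
  have hdin : ∀ u : Int,
      (g.values.foldl (fun d vizinhos =>
        (PySem.Set.ofList vizinhos).foldl (fun d u => d.insert u (d.getD u 0 + 1)) d)
        PySem.Dict.empty).getD u 0
      = (g.values.countP (fun vs => vs.contains u) : Int) := by
    intro u
    rw [pv_dinfold g.values PySem.Dict.empty u]
    simp [PySem.Dict.getD_empty]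
  -- the two in-degree counts agree: both count the adjacency lists containing u
  have hcount : ∀ u : Int, (g.values.countP (fun vs => vs.contains u) : Int) = (N u : Int) := by
    intro u
    have h1 : g.values.countP (fun vs => vs.contains u)
        = g.items.countP (fun p => p.2.contains u) := by
      simp only [PySem.Dict.values, List.countP_map]; rfl
    have h2 : g.keys.countP (fun v => (g.getD v []).contains u)
        = g.items.countP (fun p => (g.getD p.1 []).contains u) := by
      simp only [PySem.Dict.keys, List.countP_map]; rfl
    have h3 : g.items.countP (fun p => (g.getD p.1 []).contains u)
        = g.items.countP (fun p => p.2.contains u) := by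
      apply List.countP_congr
      intro p hp
      rw [PySem.Dict.getD_of_mem_items g (by exact hp) hnd]
    rw [hN]; simp only [h1, h2, h3]
  -- ===== assemble =====
  rw [hAitems, List.map_map, PySem.Dict.items_eq_map_keys g hnd [], List.map_map]
  apply List.map_congr_left
  intro u hu
  simp only [Function.comp_apply, hP3getD u hu, hdin, hcount]
  rfl

-- ===== VERDICT (by name: the statement is the Claim_ definition above) =====
theorem grau_vertices_spec : Claim_equal_grau_vertices := by
  intro grafo _
  unfold Spec_grau_vertices
  exact grau_vertices_eq grafo
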